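-- pv_equiv track=rewrite | github.com/notdenied/miptctf_2026_finals | checkers/babuinterpreter/generator.py | invert_block_rotate
-- ===== SOURCE A (Python) =====
-- def rotate_left_list(items: list[str], amount: int) -> list[str]:
--     if not items:
--         return []
--     shift = amount % len(items)
--     return items[shift:] + items[:shift]
--
-- def reverse_chunks(text: str, chunk: int) -> str:
--     if chunk <= 0:
--         raise ValueError("chunk size must be positive")
--     prefix = ""
--     start = 0
--     remainder = len(text) % chunk
--     if remainder != 0:
--         prefix = text[:remainder]
--         start = remainder
--     parts = [text[i : i + chunk] for i in range(start, len(text), chunk)]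
--     parts.reverse()
--     return prefix + "".join(parts)
--
-- def block_rotate(text: str, rotate_amount: int, chunk: int) -> str:
--     rotated = "".join(rotate_left_list(list(text), rotate_amount))
--     return reverse_chunks(rotated, chunk)
--
-- def invert_block_rotate(output: str, rotate_amount: int, chunk: int) -> str:
--     markers = "".join(chr(0xE000 + i) for i in range(len(output)))
--     transformed = block_rotate(markers, rotate_amount, chunk)
--     positions = {ch: index for index, ch in enumerate(markers)}
--     rebuilt = [""] * len(output)
--     for out_index, marker in enumerate(transformed):
--         rebuilt[positions[marker]] = output[out_index]
--     return "".join(rebuilt)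
-- ===== SOURCE B (Python) =====
-- def invert_block_rotate(output: str, rotate_amount: int, chunk: int) -> str:
--     if chunk <= 0:
--         raise ValueError("chunk size must be positive")
--     n = len(output)
--     if n == 0:
--         return ""
--     shift = rotate_amount % n
--     remainder = n % chunk
--     full = n // chunk
--     rebuilt = [""] * n
--     for p, ch in enumerate(output):
--         if p < remainder:
--             j = p
--         else:
--             off = p - remainder
--             j = remainder + (full - 1 - off // chunk) * chunk + off % chunk
--         rebuilt[(j + shift) % n] = ch
--     return "".join(rebuilt)
-- ===== Notes on version B (the rewrite author's own statement) =====
-- stated objective: simpler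
-- what changed: A reconstructs the permutation by building a private-use-area marker string, running block_rotate on it and inverting it via a char->index dict; B computes the inverse permutation index for each output position directly with modular arithmetic (shift, remainder, reversed-chunk offset), with no marker string and no dict.
import Mathlib
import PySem

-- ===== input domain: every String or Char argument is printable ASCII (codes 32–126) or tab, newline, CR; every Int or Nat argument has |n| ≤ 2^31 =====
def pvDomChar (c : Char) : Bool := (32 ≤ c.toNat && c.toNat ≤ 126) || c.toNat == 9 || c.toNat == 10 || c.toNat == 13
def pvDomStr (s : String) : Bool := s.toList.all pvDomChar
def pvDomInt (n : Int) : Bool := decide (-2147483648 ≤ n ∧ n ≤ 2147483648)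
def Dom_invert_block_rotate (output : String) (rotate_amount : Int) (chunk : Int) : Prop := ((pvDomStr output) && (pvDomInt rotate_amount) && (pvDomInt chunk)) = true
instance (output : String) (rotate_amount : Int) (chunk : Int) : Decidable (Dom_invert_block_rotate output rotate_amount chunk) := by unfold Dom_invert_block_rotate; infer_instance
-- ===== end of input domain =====

-- B replaces A's marker-string / dict machinery by computing the inverse permutation index arithmetically; objective: simpler.

-- ===== PORT A =====
def rotate_left_list {α : Type} (items : List α) (amount : Int) : List α :=
  if items = [] then []
  else
    let shift := PySem.Int.mod amount (items.length : Int)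
    PySem.List.slice items (some shift) none ++ PySem.List.slice items none (some shift)

def reverse_chunks {α : Type} (text : List α) (chunk : Int) : List α :=
  -- chunk <= 0: Python raises ValueError (excluded by Pre_); we return []
  if chunk ≤ 0 then []
  else
    let remainder := PySem.Int.mod (text.length : Int) chunk
    let prefx := if remainder ≠ 0 then PySem.List.slice text none (some remainder) else []
    let start := if remainder ≠ 0 then remainder else 0
    let parts := (PySem.List.pyRange start (text.length : Int) chunk).map
      (fun i => PySem.List.slice text (some i) (some (i + chunk)))
    prefx ++ parts.reverse.flatten

def block_rotate {α : Type} (text : List α) (rotate_amount : Int) (chunk : Int) : List α :=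
  reverse_chunks (rotate_left_list text rotate_amount) chunk

def invert_block_rotate (output : String) (rotate_amount : Int) (chunk : Int) : String :=
  let out := output.toList
  -- chr(0xE000+i) raises ValueError once 0xE000+i > 0x10FFFF (excluded by Pre_)
  let markers : List Char := (List.range out.length).map (fun i => Char.ofNat (0xE000 + i))
  let transformed := block_rotate markers rotate_amount chunk
  let positions : PySem.Dict Char Int :=
    (PySem.List.enumerate markers).foldl (fun d p => d.insert p.2 p.1) PySem.Dict.empty
  let rebuilt := (PySem.List.enumerate transformed).foldl
    (fun rb p => PySem.List.pySetD rb (positions.getD p.2 0) [PySem.List.pyGetD out p.1 ' '])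
    (List.replicate out.length ([] : List Char))
  String.ofList rebuilt.flatten

-- ===== PORT B =====
def invert_block_rotate_alt (output : String) (rotate_amount : Int) (chunk : Int) : String :=
  if chunk ≤ 0 then ""  -- Python raises ValueError (excluded by Pre_)
  else
    let out := output.toList
    if out.length = 0 then ""
    else
      let n : Int := out.length
      let shift := PySem.Int.mod rotate_amount n
      let remainder := PySem.Int.mod n chunk
      let full := PySem.Int.floordiv n chunk
      let rebuilt := (PySem.List.enumerate out).foldl
        (fun rb p =>
          let j := if p.1 < remainder then p.1
                   else
                     let off := p.1 - remainder
                     remainder + (full - 1 - PySem.Int.floordiv off chunk) * chunk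
                       + PySem.Int.mod off chunk
          PySem.List.pySetD rb (PySem.Int.mod (j + shift) n) [p.2])
        (List.replicate out.length ([] : List Char))
      String.ofList rebuilt.flatten

-- ===== PRECONDITION & SPEC =====
-- Pre_ excludes exactly the inputs where A raises: chunk <= 0 (ValueError "chunk size must be positive"),
-- and strings longer than 0x102000, where chr(0xE000 + i) raises ValueError.
def Pre_invert_block_rotate (output : String) (rotate_amount : Int) (chunk : Int) : Prop :=
  0 < chunk ∧ output.toList.length ≤ 1056768

instance (output : String) (rotate_amount : Int) (chunk : Int) : Decidable (Pre_invert_block_rotate output rotate_amount chunk) := by unfold Pre_invert_block_rotate; infer_instance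

def pvWitness_invert_block_rotate : String × Int × Int := ("abcde", 7, 2)

def Spec_invert_block_rotate (output : String) (rotate_amount : Int) (chunk : Int) (out : String) : Prop := out = invert_block_rotate_alt output rotate_amount chunk
instance (output : String) (rotate_amount : Int) (chunk : Int) (out : String) : Decidable (Spec_invert_block_rotate output rotate_amount chunk out) := by unfold Spec_invert_block_rotate; infer_instance

-- ===== CLAIM (what is proved, stated in full; the proofs are below) =====
def Claim_equal_invert_block_rotate : Prop := ∀ (output : String) (rotate_amount : Int) (chunk : Int), Dom_invert_block_rotate output rotate_amount chunk → Pre_invert_block_rotate output rotate_amount chunk → Spec_invert_block_rotate output rotate_amount chunk (invert_block_rotate output rotate_amount chunk)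

-- ===== LEMMAS AND PROOFS =====

-- the marker character for index i
def pvG (i : Nat) : Char := Char.ofNat (0xE000 + i)

-- the index permutation performed by reverse_chunks on [0..n)
def rcIdx (n c p : Nat) : Nat :=
  if p < n % c then p else n % c + (n / c - 1 - (p - n % c) / c) * c + (p - n % c) % c

theorem slice_map {α β : Type} (f : α → β) (l : List α) (a? b? : Option Int) :
    PySem.List.slice (l.map f) a? b? = (PySem.List.slice l a? b?).map f := by
  unfold PySem.List.slice
  cases a? <;> cases b? <;> simp [← List.map_take, ← List.map_drop]

theorem rot_map {α β : Type} (f : α → β) (l : List α) (a : Int) :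
    rotate_left_list (l.map f) a = (rotate_left_list l a).map f := by
  unfold rotate_left_list
  rcases eq_or_ne l [] with rfl | h
  · simp
  · rw [if_neg (by simpa using h), if_neg h]
    simp [slice_map]

theorem rc_map {α β : Type} (f : α → β) (l : List α) (c : Int) :
    reverse_chunks (l.map f) c = (reverse_chunks l c).map f := by
  unfold reverse_chunks
  split
  · simp
  · simp only [List.length_map]
    split <;> simp [slice_map, Function.comp_def, ← List.map_reverse, List.map_flatten]

theorem mod_pos_bounds (a b : Int) (hb : 0 < b) :
    0 ≤ PySem.Int.mod a b ∧ PySem.Int.mod a b < b := by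
  rw [PySem.Int.mod_eq_emod_of_pos hb]
  exact ⟨Int.emod_nonneg a (by omega), Int.emod_lt_of_pos a hb⟩

theorem rot_aux (n s : Nat) (h : s < n) :
    (List.range n).drop s ++ (List.range n).take s
      = (List.range n).map (fun j => (j + s) % n) := by
  apply List.ext_getElem
  · simp; omega
  · intro i h1 h2
    simp only [List.length_map, List.length_range] at h2
    rw [List.getElem_append]
    split
    · simp only [List.getElem_drop, List.getElem_range, List.getElem_map]
      rw [Nat.mod_eq_of_lt (by simp_all; omega)]
      omega
    · simp only [List.getElem_take, List.getElem_range, List.getElem_map]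
      simp only [List.length_drop, List.length_range] at *
      rw [Nat.mod_eq_sub_mod (by omega), Nat.mod_eq_of_lt (by omega)]
      omega

theorem rot_range (n : Nat) (hn : 0 < n) (a : Int) :
    rotate_left_list (List.range n) a
      = (List.range n).map (fun j => (j + (PySem.Int.mod a n).toNat) % n) := by
  unfold rotate_left_list
  rw [if_neg (by simp; omega)]
  have hb := mod_pos_bounds a n (by exact_mod_cast hn)
  show PySem.List.slice (List.range n) (some (PySem.Int.mod a ((List.range n).length : Int))) none
      ++ PySem.List.slice (List.range n) none (some (PySem.Int.mod a ((List.range n).length : Int))) = _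
  simp only [List.length_range]
  rw [PySem.List.slice_from (List.range n) hb.1, PySem.List.slice_to (List.range n) hb.1]
  exact rot_aux n _ (by omega)

theorem chunks_flatten (c r : Nat) (hc : 0 < c) : ∀ q : Nat,
    (((List.range q).map (fun k => (List.range c).map (fun u => r + c * k + u))).reverse).flatten
      = (List.range (q * c)).map (fun off => r + (q - 1 - off / c) * c + off % c) := by
  intro q
  induction q with
  | zero => simp
  | succ q ih =>
    rw [List.range_succ, List.map_append, List.reverse_append]
    simp only [List.map_cons, List.map_nil, List.reverse_cons, List.reverse_nil,
      List.nil_append, List.cons_append, List.flatten_cons]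
    rw [ih]
    have h1 : (q + 1) * c = c + q * c := by ring
    rw [h1, List.range_add, List.map_append, List.map_map]
    congr 1
    · apply List.map_congr_left
      intro u hu
      simp only [List.mem_range] at hu
      rw [Nat.div_eq_of_lt hu, Nat.mod_eq_of_lt hu]
      have : q + 1 - 1 - 0 = q := by omega
      rw [this, Nat.mul_comm]
    · apply List.map_congr_left
      intro off hoff
      simp only [List.mem_range, Function.comp_apply] at *
      rw [Nat.add_mod_left]
      have h2 : (c + off) / c = off / c + 1 := by
        rw [Nat.add_comm, Nat.add_div_right _ hc]
      rw [h2]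
      have h3 : q + 1 - 1 - (off / c + 1) = q - 1 - off / c := by omega
      rw [h3]

theorem chunk_slice (n c r k : Nat) (h : r + c * k + c ≤ n) :
    ((List.range n).drop (r + c * k)).take c = (List.range c).map (fun u => r + c * k + u) := by
  apply List.ext_getElem
  · simp; omega
  · intro i h1 h2
    simp only [List.getElem_take, List.getElem_drop, List.getElem_range, List.getElem_map]

theorem rc_range (n : Nat) (chunk : Int) (hc : 0 < chunk) :
    reverse_chunks (List.range n) chunk = (List.range n).map (rcIdx n chunk.toNat) := by
  obtain ⟨c, hcast, hc'⟩ : ∃ c : Nat, chunk = (c : Int) ∧ 0 < c := ⟨chunk.toNat, by omega, by omega⟩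
  subst hcast
  have hrc : n % c < c := Nat.mod_lt _ hc'
  have hn : n % c + n / c * c = n := Nat.mod_add_div' n c
  unfold reverse_chunks
  rw [if_neg (by omega)]
  show (if PySem.Int.mod ((List.range n).length : Int) (c : Int) ≠ 0 then
          PySem.List.slice (List.range n) none (some (PySem.Int.mod ((List.range n).length : Int) (c : Int))) else [])
      ++ (((PySem.List.pyRange (if PySem.Int.mod ((List.range n).length : Int) (c : Int) ≠ 0 then PySem.Int.mod ((List.range n).length : Int) (c : Int) else 0) ((List.range n).length : Int) (c : Int)).map
          (fun i => PySem.List.slice (List.range n) (some i) (some (i + (c : Int))))).reverse).flatten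
      = (List.range n).map (rcIdx n ((c : Int)).toNat)
  simp only [List.length_range, PySem.Int.mod_natCast, Int.toNat_natCast]
  have hpre : (if ((n % c : Nat) : Int) ≠ 0 then PySem.List.slice (List.range n) none (some ((n % c : Nat) : Int)) else ([] : List Nat))
      = List.range (n % c) := by
    split
    · rw [PySem.List.slice_to_natCast, List.take_range]
      congr 1
      omega
    · rename_i h; simp only [ne_eq, not_not, Nat.cast_eq_zero] at h
      rw [h]; rfl
  have hstart : (if ((n % c : Nat) : Int) ≠ 0 then ((n % c : Nat) : Int) else 0) = ((n % c : Nat) : Int) := by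
    split; · rfl
    · rename_i h; simp only [ne_eq, not_not, Nat.cast_eq_zero] at h; omega
  rw [hpre, hstart]
  have ht : PySem.List.pyRange ((n % c : Nat) : Int) (n : Int) (c : Int)
      = (List.range (n / c)).map (fun k => ((n % c + c * k : Nat) : Int)) := by
    rw [PySem.List.pyRange_of_pos _ _ (by exact_mod_cast hc')]
    have htq : (if ((n % c : Nat) : Int) < (n : Int) then (((n : Int) - ((n % c : Nat) : Int) + (c : Int) - 1) / (c : Int)).toNat else 0) = n / c := by
      split
      · have key : (n : Int) - ((n % c : Nat) : Int) = ((n / c : Nat) : Int) * (c : Int) := by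
          rw [← Nat.cast_mul]; omega
        have h1 : ((n : Int) - ((n % c : Nat) : Int) + (c : Int) - 1) = ((c : Int) - 1) + ((n / c : Nat) : Int) * (c : Int) := by
          rw [← key]; ring
        rw [h1, Int.add_mul_ediv_right _ _ (show (c : Int) ≠ 0 by omega),
          Int.ediv_eq_zero_of_lt (show (0:Int) ≤ (c : Int) - 1 by omega) (show (c : Int) - 1 < (c : Int) by omega)]
        rw [zero_add, Int.toNat_natCast]
      · next hge =>
        have h3 : n < c := by
          have h5 := not_lt.mp hge
          have h6 : n ≤ n % c := by exact_mod_cast h5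
          omega
        rw [Nat.div_eq_of_lt h3]
    rw [htq]
    apply List.map_congr_left
    intro k _
    push_cast
    ring
  rw [ht, List.map_map]
  have hparts : ((List.range (n / c)).map ((fun i => PySem.List.slice (List.range n) (some i) (some (i + (c : Int)))) ∘ (fun k => ((n % c + c * k : Nat) : Int))))
      = (List.range (n / c)).map (fun k => (List.range c).map (fun u => n % c + c * k + u)) := by
    apply List.map_congr_left
    intro k hk
    simp only [List.mem_range] at hk
    simp only [Function.comp_apply]
    have hcc : ((n % c + c * k : Nat) : Int) + (c : Int) = ((n % c + c * k + c : Nat) : Int) := by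
      push_cast; ring
    rw [hcc, PySem.List.slice_natCast, Nat.add_sub_cancel_left,
      chunk_slice n c (n % c) k (by nlinarith)]
  rw [hparts, chunks_flatten c (n % c) hc' (n / c)]
  have hsplit : List.range n = List.range (n % c) ++ (List.range (n / c * c)).map (fun x => n % c + x) := by
    conv_lhs => rw [← hn]
    rw [List.range_add]
  rw [hsplit, List.map_append, List.map_map]
  congr 1
  · have h4 : List.map (rcIdx n c) (List.range (n % c)) = List.map id (List.range (n % c)) :=
      List.map_congr_left (fun p hp => by
        simp only [List.mem_range] at hp
        simp [rcIdx, hp])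
    rw [h4, List.map_id]
  · apply List.map_congr_left
    intro off hoff
    simp only [List.mem_range] at hoff
    simp only [Function.comp_apply, rcIdx]
    rw [if_neg (by omega), Nat.add_sub_cancel_left]

theorem enumerate_eq_range_map {α : Type} (xs : List α) (d : α) :
    PySem.List.enumerate xs 0
      = (List.range xs.length).map (fun (k : Nat) => ((k : Int), xs.getD k d)) := by
  apply List.ext_getElem
  · simp [PySem.List.length_enumerate]
  · intro i h1 h2
    simp only [PySem.List.length_enumerate] at h1
    rw [PySem.List.getElem_enumerate]
    simp only [List.getElem_map, List.getElem_range]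
    rw [List.getD_eq_getElem _ _ (by simpa using h2)]
    simp

theorem enum_map_range {α : Type} (G : Nat → α) (n : Nat) (d : α) :
    PySem.List.enumerate ((List.range n).map G) 0
      = (List.range n).map (fun (k : Nat) => ((k : Int), G k)) := by
  rw [enumerate_eq_range_map _ d]
  simp only [List.length_map, List.length_range]
  apply List.map_congr_left
  intro k hk
  simp only [List.mem_range] at hk
  rw [List.getD_eq_getElem _ _ (by simpa using hk)]
  simp

theorem toNat_pvG (i : Nat) (hi : i < 1056768) : (pvG i).toNat = 0xE000 + i := by
  unfold pvG
  rw [Char.toNat_ofNat, if_pos (show Nat.isValidChar (0xE000 + i) from Or.inr ⟨by omega, by omega⟩)]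

theorem pvG_inj (i j : Nat) (hi : i < 1056768) (hj : j < 1056768) (h : pvG i = pvG j) : i = j := by
  have := congrArg Char.toNat h
  rw [toNat_pvG i hi, toNat_pvG j hj] at this
  omega

theorem markers_nodup (n : Nat) (hn : n ≤ 1056768) : ((List.range n).map pvG).Nodup :=
  (List.nodup_range).map_on (fun i hi j hj h =>
    pvG_inj i j (by simp at hi; omega) (by simp at hj; omega) h)

theorem positions_getD (n : Nat) (hn : n ≤ 1056768) (i : Nat) (hi : i < n) :
    (((PySem.List.enumerate ((List.range n).map pvG)).foldl
        (fun d p => d.insert p.2 p.1) PySem.Dict.empty).getD (pvG i) 0) = (i : Int) := by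
  have hfresh : ∀ a ∈ PySem.List.enumerate ((List.range n).map pvG),
      (PySem.Dict.empty : PySem.Dict Char Int).contains a.2 = false := by
    intro a _
    exact PySem.Dict.contains_empty _
  have hkeysnodup : ((PySem.List.enumerate ((List.range n).map pvG)).map (·.2)).Nodup := by
    rw [PySem.List.map_snd_enumerate]
    exact markers_nodup n hn
  have hitems := PySem.Dict.items_foldl_insert_fresh
    (l := PySem.List.enumerate ((List.range n).map pvG))
    (k := (·.2)) (v := (·.1)) (d := PySem.Dict.empty) hfresh hkeysnodup
  have hmem : (pvG i, (i : Int)) ∈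
      ((PySem.List.enumerate ((List.range n).map pvG)).foldl
        (fun d p => d.insert p.2 p.1) PySem.Dict.empty).items := by
    rw [hitems]
    simp only [PySem.Dict.empty, List.nil_append, List.mem_map]
    refine ⟨((i : Int), pvG i), ?_, rfl⟩
    rw [PySem.List.mem_enumerate_iff]
    exact ⟨i, by simpa using hi, by simp⟩
  have hnodup : ((PySem.List.enumerate ((List.range n).map pvG)).foldl
        (fun d p => d.insert p.2 p.1) PySem.Dict.empty).keys.Nodup :=
    PySem.Dict.nodup_keys_foldl_insert_key
      (PySem.List.enumerate ((List.range n).map pvG))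
      (fun (p : Int × Char) => p.2)
      (fun (_ : PySem.Dict Char Int) (p : Int × Char) => p.1)
      PySem.Dict.empty PySem.Dict.nodup_keys_empty
  exact PySem.Dict.getD_of_mem_items _ hmem hnodup 0

theorem alt_index_eq (n c s k : Nat) (hc' : 0 < c) (hk : k < n) :
    PySem.Int.mod
      ((if (k : Int) < PySem.Int.mod (n : Int) (c : Int) then (k : Int)
        else PySem.Int.mod (n : Int) (c : Int)
          + (PySem.Int.floordiv (n : Int) (c : Int) - 1
              - PySem.Int.floordiv ((k : Int) - PySem.Int.mod (n : Int) (c : Int)) (c : Int)) * (c : Int)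
          + PySem.Int.mod ((k : Int) - PySem.Int.mod (n : Int) (c : Int)) (c : Int)) + (s : Int))
      (n : Int)
      = (((rcIdx n c k + s) % n : Nat) : Int) := by
  have hdiv : n % c + n / c * c = n := Nat.mod_add_div' n c
  rw [PySem.Int.mod_natCast, PySem.Int.floordiv_natCast]
  split
  · next hlt =>
    have hklt : k < n % c := by exact_mod_cast hlt
    rw [rcIdx, if_pos hklt]
    rw [show (k : Int) + (s : Int) = ((k + s : Nat) : Int) by push_cast; ring,
      PySem.Int.mod_natCast]
  · next hge =>
    have hkge : n % c ≤ k := by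
      have := not_lt.mp hge
      exact_mod_cast this
    have hoffcast : (k : Int) - ((n % c : Nat) : Int) = ((k - n % c : Nat) : Int) := by omega
    rw [hoffcast, PySem.Int.mod_natCast, PySem.Int.floordiv_natCast, rcIdx,
      if_neg (by omega)]
    have hofflt : k - n % c < n / c * c := by omega
    have hq : (k - n % c) / c < n / c := by
      rw [Nat.div_lt_iff_lt_mul hc']
      omega
    generalize hQ : n / c = Q at *
    generalize hD : (k - n % c) / c = D at *
    generalize hM : (k - n % c) % c = M at *
    generalize hR : n % c = R at *
    have hsub : ((Q : Nat) : Int) - 1 - ((D : Nat) : Int) = ((Q - 1 - D : Nat) : Int) := by omega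
    rw [hsub, show (((R : Nat) : Int) + ((Q - 1 - D : Nat) : Int) * ((c : Nat) : Int) + ((M : Nat) : Int) + ((s : Nat) : Int))
        = ((R + (Q - 1 - D) * c + M + s : Nat) : Int) by push_cast; ring,
      PySem.Int.mod_natCast]

theorem block_rotate_perm (n : Nat) (hn : 0 < n) (ra : Int) (c : Nat) (hc' : 0 < c) :
    block_rotate ((List.range n).map pvG) ra (c : Int)
      = (List.range n).map (fun k => pvG ((rcIdx n c k + (PySem.Int.mod ra (n : Int)).toNat) % n)) := by
  unfold block_rotate
  rw [rot_map, rot_range n hn ra, rc_map, rc_map, rc_range n (c : Int) (by exact_mod_cast hc'),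
    Int.toNat_natCast, List.map_map, List.map_map]
  rfl

theorem main_eq (output : String) (rotate_amount chunk : Int)
    (hc : 0 < chunk) (hlen : output.toList.length ≤ 1056768) :
    invert_block_rotate output rotate_amount chunk
      = invert_block_rotate_alt output rotate_amount chunk := by
  obtain ⟨c, hcc, hc'⟩ : ∃ c : Nat, chunk = (c : Int) ∧ 0 < c := ⟨chunk.toNat, by omega, by omega⟩
  subst hcc
  simp only [invert_block_rotate, invert_block_rotate_alt]
  rw [if_neg (by omega)]
  by_cases hn0 : output.toList.length = 0
  · rw [if_pos hn0]
    have hxs : output.toList = [] := List.length_eq_zero_iff.mp hn0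
    rw [hxs]
    have hbr : block_rotate (List.map (fun i => Char.ofNat (57344 + i)) (List.range ([] : List Char).length)) rotate_amount ((c : Nat) : Int) = [] := by
      show block_rotate ((List.range 0).map pvG) rotate_amount _ = []
      unfold block_rotate
      rw [show rotate_left_list ((List.range 0).map pvG) rotate_amount = (List.range 0).map pvG by
            simp [rotate_left_list],
        rc_map, rc_range 0 _ (by exact_mod_cast hc')]
      simp
    rw [hbr]
    rfl
  · rw [if_neg hn0]
    have hn : 0 < output.toList.length := Nat.pos_of_ne_zero hn0
    have hm : List.map (fun i => Char.ofNat (57344 + i)) (List.range output.toList.length)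
        = (List.range output.toList.length).map pvG := rfl
    rw [hm]
    obtain ⟨s, hs, hslt⟩ : ∃ s : Nat,
        PySem.Int.mod rotate_amount (output.toList.length : Int) = (s : Int)
          ∧ s < output.toList.length := by
      have hb := mod_pos_bounds rotate_amount (output.toList.length : Int) (by exact_mod_cast hn)
      exact ⟨(PySem.Int.mod rotate_amount (output.toList.length : Int)).toNat, by omega, by omega⟩
    have hperm : block_rotate ((List.range output.toList.length).map pvG) rotate_amount ((c : Nat) : Int)
        = (List.range output.toList.length).map
            (fun k => pvG ((rcIdx output.toList.length c k + s) % output.toList.length)) := by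
      have h := block_rotate_perm output.toList.length hn rotate_amount c hc'
      rw [hs, Int.toNat_natCast] at h
      exact h
    rw [hperm,
      enum_map_range (fun k => pvG ((rcIdx output.toList.length c k + s) % output.toList.length))
        output.toList.length ' ',
      List.foldl_map, enumerate_eq_range_map output.toList ' ', List.foldl_map]
    congr 2
    apply PySem.List.foldl_congr_mem
    intro acc x hx
    simp only [List.mem_range] at hx
    dsimp only
    rw [positions_getD output.toList.length hlen _ (Nat.mod_lt _ hn),
      PySem.List.pyGetD_natCast, PySem.List.pySetD_natCast, hs,
      alt_index_eq output.toList.length c s x hc' hx, PySem.List.pySetD_natCast]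

-- ===== VERDICT (by name: the statement is the Claim_ definition above) =====
theorem invert_block_rotate_spec : Claim_equal_invert_block_rotate := by
  intro output rotate_amount chunk _ hpre
  exact main_eq output rotate_amount chunk hpre.1 hpre.2
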